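-- pv_equiv track=rewrite | github.com/fuxuelinwudi/GAIIC2023_4TH | 复赛复现/project/my_code/finetune/run_finetune.py | array2str
-- ===== SOURCE A (Python) =====
-- def array2str(arr):
--     out = ''
--     for i in range(len(arr)):
--         if arr[i] == '[PAD]' or arr[i] == '[SEP]':
--             break
--         if arr[i] == '[CLS]':
--             continue
--         out += str(arr[i]) + ' '
--     if len(out.strip()) == 0:
--         out = '0'
--     return out.strip()
-- ===== SOURCE B (Python) =====
-- def array2str(arr):
--     cut = next((i for i, t in enumerate(arr) if t in ('[PAD]', '[SEP]')), len(arr))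
--     tokens = [str(t) for t in arr[:cut] if t != '[CLS]']
--     res = ' '.join(tokens).strip()
--     return res if res else '0'
-- ===== Notes on version B (the rewrite author's own statement) =====
-- stated objective: idiomatic
-- what changed: Replaces the imperative scan with break/continue and string concatenation by finding the cut index once, slicing, filtering out '[CLS]' and a single ' '.join with a strip and an or-fallback.
import Mathlib
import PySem

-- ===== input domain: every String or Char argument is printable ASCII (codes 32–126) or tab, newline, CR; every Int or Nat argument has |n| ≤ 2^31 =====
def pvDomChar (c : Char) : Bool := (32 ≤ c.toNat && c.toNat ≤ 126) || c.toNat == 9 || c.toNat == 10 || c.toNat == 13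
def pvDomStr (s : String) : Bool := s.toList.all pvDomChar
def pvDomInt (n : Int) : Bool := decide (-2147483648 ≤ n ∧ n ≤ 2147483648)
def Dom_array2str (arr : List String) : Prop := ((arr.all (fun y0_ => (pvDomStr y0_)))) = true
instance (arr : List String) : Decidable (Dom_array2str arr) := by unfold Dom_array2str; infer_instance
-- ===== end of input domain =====

-- B: finds the cut index once, slices, filters '[CLS]' and joins with ' ' (idiomatic pipeline) instead of A's scan with break/continue and string concatenation; same return value.
-- ===== PORT A =====
-- the loop: break on '[PAD]'/'[SEP]', skip '[CLS]', else out += str(arr[i]) + ' '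
def array2strGoA : List String → List Char → List Char
  | [], out => out
  | x :: xs, out =>
    if x == "[PAD]" || x == "[SEP]" then out
    else if x == "[CLS]" then array2strGoA xs out
    else array2strGoA xs (out ++ x.toList ++ [' '])

def array2str (arr : List String) : String :=
  let out := array2strGoA arr []
  let out := if (PySem.Chars.strip out).length = 0 then ['0'] else out
  String.ofList (PySem.Chars.strip out)

-- ===== PORT B =====
def array2str_alt (arr : List String) : String :=
  let cut := arr.findIdx (fun t => t == "[PAD]" || t == "[SEP]")
  let tokens := (arr.take cut).filter (fun t => t != "[CLS]")
  let res := PySem.Chars.strip (PySem.Chars.join [' '] (tokens.map String.toList))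
  if res = [] then "0" else String.ofList res

-- ===== PRECONDITION & SPEC =====
def Spec_array2str (arr : List String) (out : String) : Prop := out = array2str_alt arr
instance (arr : List String) (out : String) : Decidable (Spec_array2str arr out) := by unfold Spec_array2str; infer_instance

-- ===== CLAIM (what is proved, stated in full; the proofs are below) =====
def Claim_equal_array2str : Prop := ∀ (arr : List String), Dom_array2str arr → Spec_array2str arr (array2str arr)

-- ===== LEMMAS AND PROOFS =====

-- the kept tokens: prefix before the first '[PAD]'/'[SEP]', with '[CLS]' dropped
def keptToks (arr : List String) : List String :=
  (arr.takeWhile (fun t => !(t == "[PAD]" || t == "[SEP]"))).filter (fun t => t != "[CLS]")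

lemma goA_eq (arr : List String) (out : List Char) :
    array2strGoA arr out
      = out ++ (keptToks arr).flatMap (fun t => t.toList ++ [' ']) := by
  induction arr generalizing out with
  | nil => simp [array2strGoA, keptToks]
  | cons x xs ih =>
    by_cases hp : x = "[PAD]"
    · subst hp; simp [array2strGoA, keptToks]
    by_cases hs : x = "[SEP]"
    · subst hs; simp [array2strGoA, keptToks]
    by_cases hc : x = "[CLS]"
    · subst hc
      simp [array2strGoA, keptToks, ih]
    · simp [array2strGoA, keptToks, 
        hp, hs, hc, ih, List.append_assoc]

lemma take_findIdx_eq (arr : List String) (p : String → Bool) :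
    arr.take (arr.findIdx p) = arr.takeWhile (fun t => !p t) := by
  induction arr with
  | nil => rfl
  | cons x xs ih =>
    by_cases h : p x
    · simp [List.findIdx_cons, h]
    · simp [List.findIdx_cons, h, ih]

lemma isspace_space : PySem.Chars.isspace ' ' = true := by decide

lemma rstrip_space (s : List Char) :
    PySem.Chars.rstrip (s ++ [' ']) = PySem.Chars.rstrip s := by
  simp [PySem.Chars.rstrip, isspace_space]

lemma strip_space (s : List Char) :
    PySem.Chars.strip (s ++ [' ']) = PySem.Chars.strip s := by
  simp only [PySem.Chars.strip, PySem.Chars.lstrip, List.dropWhile_append]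
  by_cases h : (List.dropWhile PySem.Chars.isspace s).isEmpty
  · rw [List.isEmpty_iff] at h
    simp [h, isspace_space, PySem.Chars.rstrip]
  · simp [h, rstrip_space]

lemma flatMap_eq_join (toks : List String) :
    toks.flatMap (fun t => t.toList ++ [' '])
      = if toks = [] then []
        else PySem.Chars.join [' '] (toks.map String.toList) ++ [' '] := by
  induction toks with
  | nil => rfl
  | cons x xs ih =>
    cases xs with
    | nil => simp [PySem.Chars.join_singleton]
    | cons y ys =>
      simp only [List.flatMap_cons, ih, if_neg (List.cons_ne_nil y ys),
        List.map_cons, PySem.Chars.join_cons_cons]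
      simp [List.append_assoc]

lemma strip_core (arr : List String) :
    PySem.Chars.strip (array2strGoA arr [])
      = PySem.Chars.strip
          (PySem.Chars.join [' '] ((keptToks arr).map String.toList)) := by
  rw [goA_eq, List.nil_append, flatMap_eq_join]
  by_cases h : keptToks arr = []
  · simp [h, PySem.Chars.join_nil]
  · simp [h, strip_space]

lemma alt_eq (arr : List String) :
    array2str_alt arr
      = (if PySem.Chars.strip (PySem.Chars.join [' '] ((keptToks arr).map String.toList)) = []
         then "0"
         else String.ofList
           (PySem.Chars.strip (PySem.Chars.join [' '] ((keptToks arr).map String.toList)))) := by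
  simp only [array2str_alt, take_findIdx_eq, keptToks]

-- ===== VERDICT (by name: the statement is the Claim_ definition above) =====
theorem array2str_spec : Claim_equal_array2str := by
  intro arr _
  unfold Spec_array2str
  show array2str arr = array2str_alt arr
  have hS := strip_core arr
  rw [alt_eq]
  by_cases h : PySem.Chars.strip (PySem.Chars.join [' '] ((keptToks arr).map String.toList)) = []
  · have hlen : (PySem.Chars.strip (array2strGoA arr [])).length = 0 := by
      rw [hS, h]; rfl
    rw [if_pos h]
    simp only [array2str]
    rw [if_pos hlen]
    decide
  · have hlen : ¬ (PySem.Chars.strip (array2strGoA arr [])).length = 0 := by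
      rw [hS]; simpa [List.length_eq_zero_iff] using h
    rw [if_neg h]
    simp only [array2str]
    rw [if_neg hlen, hS]
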